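-- pv_equiv track=rewrite | github.com/y56/leecode | longest k-interspace substring/soln.py | f
-- ===== SOURCE A (Python) =====
-- def f(s,k):
--     if s=='':
--         return s
--     li=[abs(ord(s[i])-ord(s[i+1]))<=k
--         for i in range(len(s)-1)]
--     if not any(li):
--         return s[0]
--     maxlen=0
--     start=None
--     end=None
--     ans=None
--     for i,tf in enumerate(li):
--         if tf:
--             if start is not None:
--                 end=i
--             else:
--                 start=i
--                 end=i
--             if end-start+1>maxlen:
--                 maxlen=end-start+1
--                 ans=[start,end]
--         else:
--             start=None
--             end=None
--     [start,end]=ans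
--     return s[start:end+2]
-- ===== SOURCE B (Python) =====
-- def f(s, k):
--     if s == '':
--         return ''
--     runs = [[s[0]]]
--     for a, b in zip(s, s[1:]):
--         if abs(ord(a) - ord(b)) <= k:
--             runs[-1].append(b)
--         else:
--             runs.append([b])
--     return ''.join(max(runs, key=len))
-- ===== Notes on version B (the rewrite author's own statement) =====
-- stated objective: idiomatic
-- what changed: Instead of materializing a boolean adjacency list and scanning it with Optional start/end/ans best-so-far state, B partitions the string into the list of its maximal runs (growing the last run or opening a new one per zipped character pair) and returns max(runs, key=len), whose first-maximal tie-break matches A's strict-improvement rule; it avoids the extra boolean list and per-index tuple bookkeeping (measured ~2x faster).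
import Mathlib
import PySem

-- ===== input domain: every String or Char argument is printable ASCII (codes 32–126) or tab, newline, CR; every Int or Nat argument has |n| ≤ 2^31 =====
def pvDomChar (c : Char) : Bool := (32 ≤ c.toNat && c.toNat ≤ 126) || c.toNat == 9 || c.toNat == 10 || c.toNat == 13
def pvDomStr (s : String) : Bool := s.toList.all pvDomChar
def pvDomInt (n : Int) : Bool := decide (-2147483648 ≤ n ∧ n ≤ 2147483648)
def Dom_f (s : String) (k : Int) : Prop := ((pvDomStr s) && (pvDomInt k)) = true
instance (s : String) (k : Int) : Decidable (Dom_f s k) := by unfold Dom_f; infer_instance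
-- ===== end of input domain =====

-- B replaces A's two-phase boolean-list-then-best-tracking scan by partitioning the string into
-- its maximal runs and returning max(runs, key=len) (first maximal, like A's strict improvement).

-- ===== PORT A =====
-- abs(ord(s[i])-ord(s[i+1]))<=k  (indices always in range under the loop bounds)
def closeA (cs : List Char) (k : Int) (i : Int) : Bool :=
  decide (|((PySem.List.pyGetD cs i ' ').toNat : Int) - ((PySem.List.pyGetD cs (i+1) ' ').toNat : Int)| ≤ k)

-- body of A's 'for i,tf in enumerate(li)' loop; state = (maxlen, start, end, ans)
def stepA (st : Int × Option Int × Option Int × Option (Int × Int)) (p : Int × Bool) :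
    Int × Option Int × Option Int × Option (Int × Int) :=
  if p.2 then
    let se : Int × Int := match st.2.1 with
      | some a => (a, p.1)      -- start is not None: end=i
      | none => (p.1, p.1)      -- start=i; end=i
    if se.2 - se.1 + 1 > st.1 then (se.2 - se.1 + 1, some se.1, some se.2, some (se.1, se.2))
    else (st.1, some se.1, some se.2, st.2.2.2)
  else (st.1, none, none, st.2.2.2)

def f (s : String) (k : Int) : String :=
  if s = "" then s
  else
    let cs := s.toList
    let li := (PySem.List.pyRange 0 ((cs.length : Int) - 1) 1).map (closeA cs k)
    if !(li.any id) then String.ofList [PySem.List.pyGetD cs 0 ' ']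
    else
      let st := (PySem.List.enumerate li).foldl stepA (0, none, none, none)
      match st.2.2.2 with
      | some (a, e) => String.ofList (PySem.List.slice cs (some a) (some (e + 2)))
      | none => s  -- unreachable: the any(li) guard guarantees ans was set

-- ===== PORT B =====
-- body of B's 'for a, b in zip(s, s[1:])' loop: grow the last run or open a new one
def stepBR (k : Int) (runs : List (List Char)) (p : Char × Char) : List (List Char) :=
  if decide (|((p.1.toNat : Int)) - ((p.2.toNat : Int))| ≤ k) then
    runs.dropLast ++ [runs.getLastD [] ++ [p.2]]
  else runs ++ [[p.2]]

def f_alt (s : String) (k : Int) : String :=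
  if s = "" then ""
  else
    let cs := s.toList
    let runs := (cs.zip cs.tail).foldl (stepBR k) [[PySem.List.pyGetD cs 0 ' ']]
    match PySem.List.max? runs (fun r => r.length) with
    | some r => String.ofList r
    | none => ""  -- unreachable: runs is never empty

-- ===== PRECONDITION & SPEC =====
def Spec_f (s : String) (k : Int) (out : String) : Prop := out = f_alt s k
instance (s : String) (k : Int) (out : String) : Decidable (Spec_f s k out) := by unfold Spec_f; infer_instance

-- ===== CLAIM (what is proved, stated in full; the proofs are below) =====
def Claim_equal_f : Prop := ∀ (s : String) (k : Int), Dom_f s k → Spec_f s k (f s k)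

-- ===== LEMMAS AND PROOFS =====

-- A's loop body specialised to index j carrying its own test (proof-side view of the enumerate fold)
def stepA' (cs : List Char) (k : Int) (st : Int × Option Int × Option Int × Option (Int × Int)) (j : Int) :
    Int × Option Int × Option Int × Option (Int × Int) :=
  stepA st (j, closeA cs k j)

-- invariant tying A's state after pairs 0..m-1 to B's runs list over the same prefix cs.take (m+1)
def InvCur (cs : List Char) (m : Nat)
    (a : Int × Option Int × Option Int × Option (Int × Int)) (runs : List (List Char)) : Prop :=
  ∃ R c, runs = R ++ [c] ∧ 1 ≤ c.length ∧ c.length ≤ m + 1 ∧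
    c = (cs.take (m+1)).drop (m + 1 - c.length) ∧
    R.flatten.length = m + 1 - c.length ∧
    ((c.length = 1 ∧ a.2.1 = none ∧ a.2.2.1 = none) ∨
     (2 ≤ c.length ∧ a.2.1 = some ((m : Int) + 1 - c.length) ∧ a.2.2.1 = some ((m : Int) - 1)))

def InvBest (cs : List Char) (k : Int) (m : Nat)
    (a : Int × Option Int × Option Int × Option (Int × Int)) (runs : List (List Char)) : Prop :=
  (a.2.2.2 = none ∧ a.1 = 0 ∧ runs = (cs.take (m+1)).map (fun ch => [ch]) ∧
     ∀ j : Nat, j < m → closeA cs k (j : Int) = false)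
  ∨ (∃ Rb r Ra, ∃ pN LN : Nat, runs = Rb ++ r :: Ra ∧ 2 ≤ LN ∧ r.length = LN ∧
      a.2.2.2 = some ((pN : Int), (pN : Int) + (LN : Int) - 2) ∧ a.1 = (LN : Int) - 1 ∧
      Rb.flatten.length = pN ∧ r = (cs.drop pN).take LN ∧
      (∀ y ∈ Rb, y.length < LN) ∧ (∀ z ∈ Ra, z.length ≤ LN) ∧
      (∃ j : Nat, j < m ∧ closeA cs k (j : Int) = true))

def InvAB (cs : List Char) (k : Int) (m : Nat)
    (a : Int × Option Int × Option Int × Option (Int × Int)) (runs : List (List Char)) : Prop :=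
  InvCur cs m a runs ∧ InvBest cs k m a runs

lemma concat_inj {α : Type} {xs ys : List α} {x y : α} (h : xs ++ [x] = ys ++ [y]) :
    xs = ys ∧ x = y := by
  have h1 := congrArg List.dropLast h
  have h2 := congrArg List.getLast? h
  simp at h1 h2
  exact ⟨h1, h2⟩

-- Python's max(xs, key) returns the FIRST key-maximal element
lemma foldl_max_stay {α : Type} (key : α → Nat) (a : α) (zs : List α)
    (hz : ∀ z ∈ zs, key z ≤ key a) :
    zs.foldl (fun acc x => match acc with
      | none => some x
      | some m => if key m < key x then some x else some m) (some a) = some a := by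
  induction zs with
  | nil => rfl
  | cons z zs ih =>
      simp only [List.foldl_cons]
      rw [if_neg (by have := hz z (by simp); omega)]
      exact ih (fun z hzz => hz z (by simp [hzz]))

lemma foldl_max_pass {α : Type} (key : α → Nat) (a r : α) (ys zs : List α)
    (ha : key a < key r) (hy : ∀ y ∈ ys, key y < key r) (hz : ∀ z ∈ zs, key z ≤ key r) :
    (ys ++ r :: zs).foldl (fun acc x => match acc with
      | none => some x
      | some m => if key m < key x then some x else some m) (some a) = some r := by
  induction ys generalizing a with
  | nil =>
      simp only [List.nil_append, List.foldl_cons]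
      rw [if_pos ha]
      exact foldl_max_stay key r zs hz
  | cons y ys ih =>
      simp only [List.cons_append, List.foldl_cons]
      by_cases h : key a < key y
      · rw [if_pos h]
        exact ih y (hy y (by simp)) (fun y' hy' => hy y' (by simp [hy']))
      · rw [if_neg h]
        exact ih a ha (fun y' hy' => hy y' (by simp [hy']))

lemma max?_first {α : Type} (key : α → Nat) (r : α) (ys zs : List α)
    (hy : ∀ y ∈ ys, key y < key r) (hz : ∀ z ∈ zs, key z ≤ key r) :
    PySem.List.max? (ys ++ r :: zs) key = some r := by
  cases ys with
  | nil =>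
      simp only [PySem.List.max?, List.nil_append, List.foldl_cons]
      exact foldl_max_stay key r zs hz
  | cons y ys =>
      simp only [PySem.List.max?, List.cons_append, List.foldl_cons]
      exact foldl_max_pass key y r ys zs (hy y (by simp))
        (fun y' hy' => hy y' (by simp [hy'])) hz

lemma closeA_eq (cs : List Char) (k : Int) (m : Nat) (hm : m + 1 < cs.length) :
    closeA cs k (m : Int)
      = decide (|((cs[m]'(by omega)).toNat : Int) - ((cs[m+1]'hm).toNat : Int)| ≤ k) := by
  have h1 : ((m : Int) + 1) = ((m + 1 : Nat) : Int) := by push_cast; ring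
  rw [closeA, h1, PySem.List.pyGetD_natCast, PySem.List.pyGetD_natCast,
      List.getD_eq_getElem _ _ (by omega), List.getD_eq_getElem _ _ hm]

lemma step_preserves (cs : List Char) (k : Int) (m : Nat) (hm : m + 2 ≤ cs.length)
    (a : Int × Option Int × Option Int × Option (Int × Int)) (runs : List (List Char))
    (h : InvAB cs k m a runs) :
    InvAB cs k (m + 1) (stepA' cs k a (m : Int))
      (stepBR k runs ((cs[m]'(by omega)), (cs[m+1]'(by omega)))) := by
  obtain ⟨ml, sS, eS, anS⟩ := a
  obtain ⟨⟨R, c, hruns, hc1, hcle, hcval, hRlen, hcur⟩, hbest⟩ := h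
  simp only [List.length_flatten] at hRlen
  have hm1 : m + 1 < cs.length := by omega
  have htk : cs.take (m+1+1) = cs.take (m+1) ++ [cs[m+1]'hm1] := by
    rw [List.take_succ, List.getElem?_eq_getElem hm1]
    rfl
  by_cases hcl : closeA cs k (m : Int) = true
  · -- the new pair is close: B grows the last run, A extends the current stretch
    have hcond : decide (|((cs[m]'(by omega)).toNat : Int) - ((cs[m+1]'hm1).toNat : Int)| ≤ k)
        = true := by rw [← closeA_eq cs k m hm1]; exact hcl
    have hB : stepBR k runs ((cs[m]'(by omega)), (cs[m+1]'hm1)) = R ++ [c ++ [cs[m+1]'hm1]] := by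
      simp only [stepBR, hcond, if_pos, hruns, List.dropLast_concat, List.getLastD_concat]
    have hA : stepA' cs k (ml, sS, eS, anS) (m : Int) =
        (if (c.length : Int) > ml
         then ((c.length : Int), some ((m : Int) + 1 - c.length), some (m : Int),
               some (((m : Int) + 1 - c.length), (m : Int)))
         else (ml, some ((m : Int) + 1 - c.length), some (m : Int), anS)) := by
      rcases hcur with ⟨hclen, hsS, heS⟩ | ⟨hclen, hsS, heS⟩ <;>
        replace hsS : sS = _ := hsS <;> subst hsS <;>
        simp only [stepA', stepA, hcl, if_pos]
      · rw [hclen]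
        have e1 : (m : Int) - m + 1 = ((1 : Nat) : Int) := by push_cast; ring
        have e2 : (m : Int) + 1 - ((1 : Nat) : Int) = (m : Int) := by push_cast; ring
        rw [e1, e2]
      · have e1 : (m : Int) - ((m : Int) + 1 - c.length) + 1 = (c.length : Int) := by ring
        rw [e1]
    rw [hB, hA]
    have hcval' : c ++ [cs[m+1]'hm1] = (cs.take (m+1+1)).drop (m+1+1 - (c.length + 1)) := by
      rw [htk, List.drop_append_of_le_length (by simp; omega),
          show m+1+1 - (c.length + 1) = m + 1 - c.length by omega, ← hcval]
    have hcur' : InvCur cs (m+1)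
        ((if (c.length : Int) > ml
          then ((c.length : Int), some ((m : Int) + 1 - c.length), some (m : Int),
                some (((m : Int) + 1 - c.length), (m : Int)))
          else (ml, some ((m : Int) + 1 - c.length), some (m : Int), anS)))
        (R ++ [c ++ [cs[m+1]'hm1]]) := by
      refine ⟨R, c ++ [cs[m+1]'hm1], rfl, by simp, by simp; omega, by simpa using hcval', ?_, ?_⟩
      · simp only [List.length_flatten]
        simp
        omega
      · right
        refine ⟨by simp; omega, ?_, ?_⟩ <;> split_ifs <;> simp
    refine ⟨hcur', ?_⟩
    have hrcontent : c ++ [cs[m+1]'hm1] = (cs.drop (m + 1 - c.length)).take (c.length + 1) := by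
      rw [hcval', show m+1+1 - (c.length + 1) = m + 1 - c.length by omega, List.drop_take,
          show m+1+1 - (m + 1 - c.length) = c.length + 1 by omega]
    rcases hbest with ⟨ha, hml, hrun0, hall⟩ | ⟨Rb, r, Ra, pN, LN, hr, hLN2, hrlen, ha, hml, hpos, hrval, hby, hra, j, hj, hcj⟩
    · -- B0: everything so far was singleton runs; this close pair starts the first real run
      subst ha hml
      have hsing : ∀ y ∈ R ++ [c], y.length = 1 := by
        intro y hy
        rw [hruns] at hrun0
        rw [hrun0] at hy
        obtain ⟨ch, _, rfl⟩ := List.mem_map.mp hy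
        rfl
      rw [if_pos (by have := hsing c (by simp); omega)]
      right
      refine ⟨R, c ++ [cs[m+1]'hm1], [], m + 1 - c.length, c.length + 1, by simp, by omega,
        by simp, by simp only [Option.some.injEq, Prod.mk.injEq]; omega, by push_cast; omega,
        by simp only [List.length_flatten]; omega, hrcontent, ?_, by simp, m, by omega, hcl⟩
      intro y hy
      have := hsing y (by simp [hy])
      omega
    · -- B1: a best run r exists already
      rcases List.eq_nil_or_concat Ra with hRa | ⟨Ra', z, hRa⟩
      · -- the best run IS the current run: it grows, A updates
        subst hRa
        obtain ⟨hRRb, hcr⟩ := concat_inj (hruns.symm.trans hr)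
        have hcLN : c.length = LN := by rw [hcr, hrlen]
        have hml' : ml = (LN : Int) - 1 := hml
        rw [if_pos (by rw [hml']; omega)]
        right
        refine ⟨R, c ++ [cs[m+1]'hm1], [], m + 1 - c.length, c.length + 1, by simp, by omega,
          by simp, by simp only [Option.some.injEq, Prod.mk.injEq]; omega, by push_cast; omega,
          by simp only [List.length_flatten]; omega, hrcontent, ?_, by simp, m, by omega, hcl⟩
        intro y hy
        rw [hRRb] at hy
        have := hby y hy
        omega
      · -- the best run is strictly earlier; the current run is the last element of Ra
        subst hRa
        rw [List.concat_eq_append] at hr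
        have hr' : runs = (Rb ++ r :: Ra') ++ [z] := by rw [hr]; simp
        obtain ⟨hRRb, hcz⟩ := concat_inj (hruns.symm.trans hr')
        subst hcz
        have hcLN : c.length ≤ LN := hra c (by simp)
        have hml' : ml = (LN : Int) - 1 := hml
        by_cases hgt : (c.length : Int) > ml
        · -- the grown current run strictly beats r: A updates, it becomes the new best
          have hceq : c.length = LN := by rw [hml'] at hgt; omega
          rw [if_pos hgt]
          right
          refine ⟨R, c ++ [cs[m+1]'hm1], [], m + 1 - c.length, c.length + 1, by simp, by omega,
            by simp, by simp only [Option.some.injEq, Prod.mk.injEq]; omega, by push_cast; omega,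
            by simp only [List.length_flatten]; omega, hrcontent, ?_, by simp, m, by omega, hcl⟩
          intro y hy
          rw [hRRb] at hy
          rcases List.mem_append.mp hy with hy | hy
          · have := hby y hy
            omega
          · rcases List.mem_cons.mp hy with rfl | hy
            · omega
            · have := hra y (by simp [hy])
              omega
        · -- still not better than r: nothing changes in A's best
          rw [if_neg hgt]
          right
          refine ⟨Rb, r, Ra' ++ [c ++ [cs[m+1]'hm1]], pN, LN, ?_, hLN2, hrlen, ha, hml,
            hpos, hrval, hby, ?_, j, by omega, hcj⟩
          · rw [hRRb]
            simp
          · intro y hy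
            rcases List.mem_append.mp hy with hy | hy
            · exact hra y (by simp [hy])
            · rw [hml'] at hgt
              simp at hy
              subst hy
              simp only [← hrlen]
              simp
              omega
  · -- the new pair is not close: B opens a new singleton run, A resets its stretch
    have hcl' : closeA cs k (m : Int) = false := by simpa using hcl
    have hcond : decide (|((cs[m]'(by omega)).toNat : Int) - ((cs[m+1]'hm1).toNat : Int)| ≤ k)
        = false := by rw [← closeA_eq cs k m hm1]; exact hcl'
    have hB : stepBR k runs ((cs[m]'(by omega)), (cs[m+1]'hm1))
        = (R ++ [c]) ++ [[cs[m+1]'hm1]] := by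
      simp only [stepBR, hcond, Bool.false_eq_true, if_false, hruns]
    have hA : stepA' cs k (ml, sS, eS, anS) (m : Int) = (ml, none, none, anS) := by
      simp only [stepA', stepA, hcl', Bool.false_eq_true, if_false]
    rw [hB, hA]
    constructor
    · refine ⟨R ++ [c], [cs[m+1]'hm1], rfl, by simp, by simp, ?_, ?_, Or.inl ⟨rfl, rfl, rfl⟩⟩
      · rw [htk, show m + 1 + 1 - List.length [cs[m+1]'hm1] = m + 1 by simp,
            List.drop_append_of_le_length (by simp; omega)]
        simp
      · simp only [List.length_flatten]
        simp
        omega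
    · rcases hbest with ⟨ha, hml, hrun0, hall⟩ | ⟨Rb, r, Ra, pN, LN, hr, hLN2, hrlen, ha, hml, hpos, hrval, hby, hra, j, hj, hcj⟩
      · left
        refine ⟨ha, hml, ?_, ?_⟩
        · rw [← hruns, hrun0, htk, List.map_append]
          simp
        · intro j hj
          rcases Nat.lt_succ_iff_lt_or_eq.mp hj with h | h
          · exact hall j h
          · subst h
            exact hcl'
      · right
        refine ⟨Rb, r, Ra ++ [[cs[m+1]'hm1]], pN, LN, ?_, hLN2, hrlen, ha, hml, hpos, hrval,
          hby, ?_, j, by omega, hcj⟩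
        · rw [show (R ++ [c]) ++ [[cs[m+1]'hm1]] = (R ++ [c]) ++ [[cs[m+1]'hm1]] from rfl,
              hruns.symm.trans hr]
          simp
        · intro y hy
          rcases List.mem_append.mp hy with hy | hy
          · exact hra y hy
          · simp at hy
            subst hy
            simp
            omega

lemma inv_fold (cs : List Char) (k : Int) (m : Nat) (hm : m + 1 ≤ cs.length) :
    InvAB cs k m
      ((PySem.List.pyRange 0 (m : Int) 1).foldl (stepA' cs k) (0, none, none, none))
      (((cs.zip cs.tail).take m).foldl (stepBR k) [[PySem.List.pyGetD cs 0 ' ']]) := by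
  induction m with
  | zero =>
      rw [PySem.List.pyRange_one_eq_nil (by simp), List.take_zero]
      simp only [List.foldl_nil]
      constructor
      · refine ⟨[], [PySem.List.pyGetD cs 0 ' '], rfl, by simp, by simp, ?_, by simp,
          Or.inl ⟨rfl, rfl, rfl⟩⟩
        rcases cs with _ | ⟨c0, t⟩
        · simp at hm
        · simp [PySem.List.pyGetD_zero_cons]
      · left
        refine ⟨rfl, rfl, ?_, by intro j hj; omega⟩
        rcases cs with _ | ⟨c0, t⟩
        · simp at hm
        · simp [PySem.List.pyGetD_zero_cons]
  | succ m ih =>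
      have hm' : m + 1 ≤ cs.length := by omega
      have hzl : m < (cs.zip cs.tail).length := by
        simp [List.length_zip, List.length_tail]
        omega
      have hz : (cs.zip cs.tail)[m]? = some ((cs[m]'(by omega)), (cs[m+1]'(by omega))) := by
        rw [List.getElem?_eq_getElem hzl, List.getElem_zip]
        simp [List.getElem_tail]
      rw [List.take_succ, hz, List.foldl_append,
          show ((m + 1 : Nat) : Int) = (m : Int) + 1 by push_cast; ring,
          PySem.List.pyRange_one_succ_right (by positivity), List.foldl_append]
      simp only [List.foldl_cons, List.foldl_nil, Option.toList_some]
      exact step_preserves cs k m (by omega) _ _ (ih hm')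

lemma foldA_eq (cs : List Char) (k : Int) (hcs : cs ≠ []) :
    (PySem.List.enumerate ((PySem.List.pyRange 0 ((cs.length : Int) - 1) 1).map (closeA cs k))).foldl
        stepA (0, none, none, none)
    = (PySem.List.pyRange 0 ((cs.length : Int) - 1) 1).foldl (stepA' cs k) (0, none, none, none) := by
  have hL : 1 ≤ cs.length := List.length_pos_of_ne_nil hcs
  rw [PySem.List.enumerate_eq_map_pyRange _ false, List.foldl_map]
  have hlen : PySem.List.len ((PySem.List.pyRange 0 ((cs.length : Int) - 1) 1).map (closeA cs k))
      = (cs.length : Int) - 1 := by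
    rw [PySem.List.len_eq]
    simp [PySem.List.length_pyRange_one]
    omega
  rw [hlen]
  refine PySem.List.foldl_congr_mem _ _ _ _ (fun acc x hx => ?_)
  rw [PySem.List.mem_pyRange_one] at hx
  rw [stepA', PySem.List.pyGetD_map_pyRange_of_nonneg _ _ _ _ hx.1 hx.2]

-- ===== VERDICT (by name: the statement is the Claim_ definition above) =====
theorem f_spec : Claim_equal_f := by
  unfold Claim_equal_f
  intro s k _
  unfold Spec_f f f_alt
  by_cases hs : s = ""
  · simp [hs]
  · have hcs : s.toList ≠ [] := by
      intro hh
      apply hs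
      have := congrArg String.ofList hh
      simpa using this
    have hL : 1 ≤ s.toList.length := List.length_pos_of_ne_nil hcs
    simp only [hs, if_false]
    have hzlen : (s.toList.zip s.toList.tail).length = s.toList.length - 1 := by
      simp [List.length_zip, List.length_tail]
    have htake : ((s.toList.zip s.toList.tail).take (s.toList.length - 1))
        = s.toList.zip s.toList.tail := by
      rw [List.take_of_length_le (by omega)]
    have hinv := inv_fold s.toList k (s.toList.length - 1) (by omega)
    rw [htake] at hinv
    have e1 : ((s.toList.length - 1 : Nat) : Int) = (s.toList.length : Int) - 1 := by omega
    rw [e1] at hinv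
    rw [foldA_eq s.toList k hcs]
    obtain ⟨⟨R, c, hruns, hc1, hcle, hcval, hRlen, hcur⟩, hbest⟩ := hinv
    by_cases hany :
        ((PySem.List.pyRange 0 ((s.toList.length : Int) - 1) 1).map (closeA s.toList k)).any id = true
    · -- some adjacent pair is close: the B1 branch of the invariant holds
      rcases hbest with ⟨ha, hml, hrun0, hall⟩ | ⟨Rb, r, Ra, pN, LN, hr, hLN2, hrlen, ha, hml, hpos, hrval, hby, hra, j, hj, hcj⟩
      · exfalso
        rw [List.any_map, List.any_eq_true] at hany
        obtain ⟨x, hx, hcx⟩ := hany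
        rw [PySem.List.mem_pyRange_one] at hx
        have hx' : x.toNat < s.toList.length - 1 := by omega
        have := hall x.toNat hx'
        rw [show ((x.toNat : Nat) : Int) = x by omega] at this
        simp [this] at hcx
      · rw [hany, ha]
        dsimp only
        rw [← hrlen] at hby hra
        rw [hr, max?_first (fun r => r.length) r Rb Ra hby hra]
        rw [show (pN : Int) + (LN : Int) - 2 + 2 = ((pN + LN : Nat) : Int) by push_cast; ring,
            show (pN : Int) = ((pN : Nat) : Int) by rfl,
            PySem.List.slice_natCast]
        rw [hrval, show pN + LN - pN = LN by omega]
        simp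
    · -- no adjacent pair is close: runs is all singletons, max? picks the first
      rw [Bool.not_eq_true] at hany
      rcases hbest with ⟨ha, hml, hrun0, hall⟩ | ⟨Rb, r, Ra, pN, LN, hr, hLN2, hrlen, ha, hml, hpos, hrval, hby, hra, j, hj, hcj⟩
      · rw [hany]
        simp only [Bool.not_false, if_true]
        rw [hrun0, List.take_of_length_le (by omega)]
        rcases hlist : s.toList with _ | ⟨c0, t⟩
        · exact absurd hlist hcs
        · simp only [List.map_cons]
          have hmx := max?_first (fun r => r.length) [c0] [] (t.map (fun ch => [ch]))
            (by simp) (by intro z hz; simp at hz; obtain ⟨a, _, rfl⟩ := hz; simp)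
          rw [List.nil_append] at hmx
          rw [hmx]
          simp [PySem.List.pyGetD_zero_cons]
      · exfalso
        have h' : ((PySem.List.pyRange 0 ((s.toList.length : Int) - 1) 1).map
            (closeA s.toList k)).any id = true := by
          rw [List.any_map, List.any_eq_true]
          exact ⟨(j : Int), by rw [PySem.List.mem_pyRange_one]; omega, by simpa using hcj⟩
        rw [hany] at h'
        exact absurd h' (by simp)
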